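-- pv_equiv track=rewrite | github.com/bryan-ojay/csca08 | Assignments/a1/a1.py | find_anchors
-- ===== SOURCE A (Python) =====
-- def find_anchors(gene, start, end, reverse):
--     '''(list, str, str, bool) -> [int, int]
--     Helper function used for splice_gene function:
--     Takes in a list representation of a gene, strings representing
--     start and end anchor strings, and a boolean choosing whether to check the
--     list in reverse.
--     Returns a list of two integers:
--     - The first integer is the index of the beginning of the first
--       start anchor string found in the list. If no start anchor is found, -1 is
--       returned.
--     - The second integer is the index of the end of the first end anchor
--       string found after the first anchor string in the list. If no end anchor
--       is found, -1 is returned.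
--     REQ: len(start) < len(gene)
--     REQ: len(end) < len(gene)
--     >>> find_anchors(['T', 'G', 'C', 'T', 'A', 'G', 'T'], "AT", "GT", True)
--     [0, 4]
--     >>> find_anchors(['T', 'G', 'T', 'G', 'G', 'G'], "GT", "GG", False)
--     [1, 4]
--     >>> find_anchors(['C', 'C', 'A', 'G', 'T', 'A'], "TA", "CC", False)
--     [4, -1]
--     '''
--     # create variables for the indices of the found anchor strings in the gene
--     # default to -1 because they have not been found yet
--     start_in_gene = -1
--     end_in_gene = -1
--
--     # convert the start and end anchors to lists
--     start_anchor = list(start)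
--     end_anchor = list(end)
--
--     # if the list is reversed, switch the start and anchor string
--     # (instead of reading from right to left, we will look for the
--     # reversed end anchor string first, followed by the reversed
--     # start anchor string)
--     if (reverse):
--         (start_anchor, end_anchor) = (end_anchor[::-1], start_anchor[::-1])
--
--     # run through the gene from the beginning of the gene up to where
--     # the end point of the start_anchor meets the end of the gene
--     start_anchor_limit = len(gene) - (len(start_anchor) - 1)
--
--     # run through the gene forwards
--     start_index = 0
--     while start_index < start_anchor_limit:
--
--         # the anchor will span its length from the current index
--         anchor_range = start_index + len(start_anchor)
--
--         # find the first index in the gene that matches the start anchor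
--         if (start_anchor == gene[start_index:anchor_range]):
--
--             # set the start_in_gene index to the found start anchor
--             start_in_gene = start_index
--
--             # set the anchor limit to the current index to
--             # stop the while loop after the current cycle finishes
--             start_anchor_limit = start_index
--
--             # find end anchor
--
--             # anchor check runs from the start of the gene up to where
--             # the endpoint of the anchor meets the end of gene
--             end_anchor_limit = len(gene) - (len(end_anchor) - 1)
--
--             # run through the gene starting from the element after
--             # the endpoint of the start anchor
--             end_index = anchor_range
--             while end_index < end_anchor_limit:
--
--                 # set the range the end anchor will cover from this index
--                 anchor_range = end_index + len(end_anchor)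
--
--                 # find the first end index that matches
--                 if (end_anchor == gene[end_index:anchor_range]):
--
--                     # set the end_in_gene index to the found end anchor
--                     end_in_gene = anchor_range - 1
--
--                     # set the anchor limit to the current index to
--                     # stop the while loop after the current cycle finishes
--                     end_anchor_limit = end_index
--
--                 end_index += 1
--
--         start_index += 1
--
--     # arrange the starting index and the ending index into a list
--     found_indices = [start_in_gene, end_in_gene]
--
--     return found_indices
-- ===== SOURCE B (Python) =====
-- def find_anchors(gene, start, end, reverse):
--     # Rabin-Karp: roll a modular polynomial fingerprint of the current window
--     # across the gene; only compare the window itself when the fingerprint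
--     # matches the pattern's (so the result is exact).
--     sa, ea = list(start), list(end)
--     if reverse:
--         sa, ea = ea[::-1], sa[::-1]
--
--     n = len(gene)
--     BASE = 1114113          # larger than any code point
--     MOD = 2305843009213693951  # 2**61 - 1
--
--     def elem_hash(s):
--         h = 0
--         for ch in s:
--             h = (h * BASE + ord(ch) + 1) % MOD
--         return h
--
--     def rk_find(pat, frm):
--         m = len(pat)
--         if m == 0:
--             return frm if frm <= n else -1
--         if frm > n - m:
--             return -1
--         target = 0
--         for x in pat:
--             target = (target * BASE + elem_hash(x)) % MOD
--         window = 0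
--         for j in range(frm, frm + m):
--             window = (window * BASE + elem_hash(gene[j])) % MOD
--         top = pow(BASE, m - 1, MOD)
--         i = frm
--         while True:
--             if window == target and gene[i:i + m] == pat:
--                 return i
--             if i == n - m:
--                 return -1
--             window = ((window - elem_hash(gene[i]) * top) * BASE + elem_hash(gene[i + m])) % MOD
--             i += 1
--
--     si = rk_find(sa, 0)
--     if si == -1:
--         return [-1, -1]
--     ei = rk_find(ea, si + len(sa))
--     return [si, -1 if ei == -1 else ei + len(ea) - 1]
-- ===== Notes on version B (the rewrite author's own statement) =====
-- stated objective: alternative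
-- what changed: A's nested while-loops re-compare a length-m window slice at every position; B is a Rabin-Karp search: it rolls a modular polynomial fingerprint of the current window in O(1) per position and only compares the window itself when the fingerprint equals the pattern's (verification keeps the result exact), composing the two searches with early returns.
import Mathlib
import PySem

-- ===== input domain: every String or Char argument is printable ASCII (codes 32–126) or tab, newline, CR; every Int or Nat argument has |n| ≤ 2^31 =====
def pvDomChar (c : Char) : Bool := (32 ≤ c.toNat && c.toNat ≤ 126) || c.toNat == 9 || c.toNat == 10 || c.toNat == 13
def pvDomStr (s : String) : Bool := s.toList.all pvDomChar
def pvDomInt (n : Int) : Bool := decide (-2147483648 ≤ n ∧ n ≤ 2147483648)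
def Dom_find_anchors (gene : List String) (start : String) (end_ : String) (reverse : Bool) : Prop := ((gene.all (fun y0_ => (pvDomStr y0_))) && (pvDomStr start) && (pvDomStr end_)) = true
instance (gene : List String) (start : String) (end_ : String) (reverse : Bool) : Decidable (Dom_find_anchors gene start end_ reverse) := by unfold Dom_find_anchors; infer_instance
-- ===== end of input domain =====

-- B replaces A's nested re-comparing window scans by a Rabin-Karp search (rolled exact
-- polynomial fingerprint, window compared only on fingerprint match); alternative algorithm, same results.

-- ===== PORT A =====
-- list(s): a Python string becomes the list of its one-character strings
def pvStrList (s : String) : List String := s.toList.map Char.toString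

-- inner while loop of A: end_index / end_anchor_limit / end_in_gene are the mutated variables;
-- the Nat fuel only bounds the iteration count (it is at least limit - endIdx at every call), the
-- loop itself still exits by the Python condition endIdx < limit
def pvAEndLoop (gene ea : List String) : Nat → Int → Int → Int → Int
  | 0, _, _, endInGene => endInGene
  | fuel + 1, endIdx, limit, endInGene =>
    if endIdx < limit then
      let anchorRange := endIdx + (ea.length : Int)
      if ea = PySem.List.slice gene (some endIdx) (some anchorRange) then
        pvAEndLoop gene ea fuel (endIdx + 1) endIdx (anchorRange - 1)
      else
        pvAEndLoop gene ea fuel (endIdx + 1) limit endInGene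
    else endInGene

-- outer while loop of A (same fuel discipline)
def pvAStartLoop (gene sa ea : List String) : Nat → Int → Int → Int → Int → Int × Int
  | 0, _, _, startInGene, endInGene => (startInGene, endInGene)
  | fuel + 1, startIdx, limit, startInGene, endInGene =>
    if startIdx < limit then
      let anchorRange := startIdx + (sa.length : Int)
      if sa = PySem.List.slice gene (some startIdx) (some anchorRange) then
        let endLimit := (gene.length : Int) - ((ea.length : Int) - 1)
        let e := pvAEndLoop gene ea (endLimit - anchorRange).toNat anchorRange endLimit endInGene
        pvAStartLoop gene sa ea fuel (startIdx + 1) startIdx startIdx e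
      else
        pvAStartLoop gene sa ea fuel (startIdx + 1) limit startInGene endInGene
    else (startInGene, endInGene)

def find_anchors (gene : List String) (start : String) (end_ : String) (reverse : Bool) : List Int :=
  let sa0 := pvStrList start
  let ea0 := pvStrList end_
  let p0 := if reverse then (ea0.reverse, sa0.reverse) else (sa0, ea0)
  let sa := p0.1
  let ea := p0.2
  let startAnchorLimit := (gene.length : Int) - ((sa.length : Int) - 1)
  let p := pvAStartLoop gene sa ea (startAnchorLimit - 0).toNat 0 startAnchorLimit (-1) (-1)
  [p.1, p.2]

-- ===== PORT B =====
-- BASE = 1114113, MOD = 2**61 - 1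
def pvBase : Int := 1114113
def pvMod : Int := 2305843009213693951

-- elem_hash(s): modular code-point polynomial of a string
def pvEH (s : String) : Int :=
  s.toList.foldl (fun h c => PySem.Int.mod (h * pvBase + (c.toNat : Int) + 1) pvMod) 0

-- the 'while True' loop of rk_find: i / window are the mutated variables; fuel only bounds
-- the iteration count (the loop exits by returning on a match or at i == n - m)
def pvRkLoop (gene pat : List String) (target top : Int) : Nat → Int → Int → Int
  | 0, _, _ => -1
  | fuel + 1, i, window =>
    if window = target ∧ pat = PySem.List.slice gene (some i) (some (i + (pat.length : Int))) then i
    else if i = (gene.length : Int) - (pat.length : Int) then -1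
    else pvRkLoop gene pat target top fuel (i + 1)
      (PySem.Int.mod ((window - pvEH (PySem.List.pyGetD gene i "") * top) * pvBase
        + pvEH (PySem.List.pyGetD gene (i + (pat.length : Int)) "")) pvMod)

-- rk_find(pat, frm); pow(BASE, m - 1, MOD) is ported as its value, pvBase ^ (m-1) mod pvMod
def pvRkFind (gene pat : List String) (frm : Int) : Int :=
  let n := (gene.length : Int)
  let m := (pat.length : Int)
  if m = 0 then (if frm ≤ n then frm else -1)
  else if frm > n - m then -1
  else
    let target := pat.foldl (fun t x => PySem.Int.mod (t * pvBase + pvEH x) pvMod) 0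
    let window := (PySem.List.pyRange frm (frm + m) 1).foldl
      (fun w j => PySem.Int.mod (w * pvBase + pvEH (PySem.List.pyGetD gene j "")) pvMod) 0
    let top := PySem.Int.mod (pvBase ^ (m - 1).toNat) pvMod
    pvRkLoop gene pat target top ((n - m - frm).toNat + 1) frm window

def find_anchors_alt (gene : List String) (start : String) (end_ : String) (reverse : Bool) : List Int :=
  let sa0 := pvStrList start
  let ea0 := pvStrList end_
  let p0 := if reverse then (ea0.reverse, sa0.reverse) else (sa0, ea0)
  let sa := p0.1
  let ea := p0.2
  let si := pvRkFind gene sa 0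
  if si == -1 then [-1, -1]
  else
    let ei := pvRkFind gene ea (si + (sa.length : Int))
    [si, if ei == -1 then -1 else ei + (ea.length : Int) - 1]

-- ===== PRECONDITION & SPEC =====
def Spec_find_anchors (gene : List String) (start : String) (end_ : String) (reverse : Bool) (out : List Int) : Prop := out = find_anchors_alt gene start end_ reverse
instance (gene : List String) (start : String) (end_ : String) (reverse : Bool) (out : List Int) : Decidable (Spec_find_anchors gene start end_ reverse out) := by unfold Spec_find_anchors; infer_instance

-- ===== CLAIM (what is proved, stated in full; the proofs are below) =====
def Claim_equal_find_anchors : Prop := ∀ (gene : List String) (start : String) (end_ : String) (reverse : Bool), Dom_find_anchors gene start end_ reverse → Spec_find_anchors gene start end_ reverse (find_anchors gene start end_ reverse)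

-- ===== LEMMAS AND PROOFS =====

-- Python's % by the positive modulus is Int.emod
lemma pv_mod_eq (a : Int) : PySem.Int.mod a pvMod = a % pvMod :=
  PySem.Int.mod_eq_emod_of_pos (by norm_num [pvMod])

-- the exact (unreduced) window polynomial, and the reduced one B's fingerprint tracks
def pvPoly (l : List String) : Int := l.foldl (fun a x => a * pvBase + pvEH x) 0

def pvPolyM (l : List String) : Int := l.foldl (fun a x => (a * pvBase + pvEH x) % pvMod) 0

lemma pvPolyM_shift (l : List String) (acc : Int) :
    l.foldl (fun a x => (a * pvBase + pvEH x) % pvMod) (acc % pvMod)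
      = (l.foldl (fun a x => a * pvBase + pvEH x) acc) % pvMod := by
  induction l generalizing acc with
  | nil => rfl
  | cons a t ih =>
    simp only [List.foldl_cons]
    have hcong : (acc % pvMod * pvBase + pvEH a) % pvMod
        = (acc * pvBase + pvEH a) % pvMod :=
      (Int.ModEq.add_right (pvEH a) (Int.ModEq.mul_right pvBase (Int.emod_emod_of_dvd acc dvd_rfl)))
    rw [hcong, ← ih]

lemma pvPolyM_eq (l : List String) : pvPolyM l = pvPoly l % pvMod := by
  have h := pvPolyM_shift l 0
  simpa [pvPolyM, pvPoly] using h

lemma pvPoly_shift (l : List String) (acc : Int) :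
    l.foldl (fun a x => a * pvBase + pvEH x) acc
      = acc * pvBase ^ l.length + pvPoly l := by
  induction l generalizing acc with
  | nil => simp [pvPoly]
  | cons a t ih =>
    simp only [List.foldl_cons, List.length_cons]
    rw [ih]
    have hc : pvPoly (a :: t) = pvEH a * pvBase ^ t.length + pvPoly t := by
      show List.foldl (fun a x => a * pvBase + pvEH x) (0 * pvBase + pvEH a) t = _
      rw [ih]; ring
    rw [hc]; ring

lemma pvPoly_cons (a : String) (t : List String) :
    pvPoly (a :: t) = pvEH a * pvBase ^ t.length + pvPoly t := by
  show List.foldl _ (0 * pvBase + pvEH a) t = _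
  rw [pvPoly_shift]; ring

lemma pvPoly_append_singleton (l : List String) (b : String) :
    pvPoly (l ++ [b]) = pvPoly l * pvBase + pvEH b := by
  unfold pvPoly
  rw [List.foldl_append]
  rfl

-- rolling-update lemma: sliding the window one step right updates its polynomial exactly
lemma pvPoly_roll (gene : List String) (i m : Nat) (hm : 1 ≤ m) (h : i + m + 1 ≤ gene.length) :
    pvPoly ((gene.drop (i + 1)).take m)
      = (pvPoly ((gene.drop i).take m) - pvEH (gene[i]'(by omega)) * pvBase ^ (m - 1)) * pvBase
        + pvEH (gene[i + m]'(by omega)) := by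
  obtain ⟨k, rfl⟩ : ∃ k, m = k + 1 := ⟨m - 1, by omega⟩
  simp only [Nat.add_sub_cancel]
  have hlen : (gene.drop i).length = gene.length - i := List.length_drop
  obtain ⟨a, t, hat⟩ : ∃ a t, gene.drop i = a :: t := by
    cases hd : gene.drop i with
    | nil => exfalso; rw [hd] at hlen; simp at hlen; omega
    | cons a t => exact ⟨a, t, rfl⟩
  have ht : gene.drop (i + 1) = t := by
    have hdd : gene.drop (i + 1) = (gene.drop i).drop 1 := by rw [List.drop_drop]
    rw [hdd, hat]; rfl
  have htl : t.length = gene.length - i - 1 := by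
    have h2 := hlen; rw [hat] at h2; simp at h2; omega
  have hkt : k < t.length := by omega
  have ha : gene[i]'(by omega) = a := by
    have h0 : (gene.drop i)[0]? = some a := by rw [hat]; rfl
    rw [List.getElem?_drop, List.getElem?_eq_getElem (by omega)] at h0
    simpa using h0
  have hb : gene[i + (k + 1)]'(by omega) = t[k]'hkt := by
    have h0 : (gene.drop (i + 1))[k]? = some (t[k]'hkt) := by
      rw [ht, List.getElem?_eq_getElem hkt]
    rw [List.getElem?_drop] at h0
    have hidx : i + 1 + k = i + (k + 1) := by omega
    rw [hidx, List.getElem?_eq_getElem (by omega)] at h0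
    simpa using h0
  rw [ht, hat, List.take_succ_cons]
  have htake : t.take (k + 1) = t.take k ++ [t[k]'hkt] := by
    rw [List.take_add_one]
    congr 1
    rw [List.getElem?_eq_getElem hkt]
    rfl
  rw [htake, pvPoly_append_singleton, pvPoly_cons, ha, hb]
  have hlt : (t.take k).length = k := by rw [List.length_take]; omega
  rw [hlt]
  ring

-- A's slice on nonnegative in-range bounds is take/drop
lemma pv_slice_eq (gene : List String) (i : Int) (m : Nat) (h0 : 0 ≤ i) :
    PySem.List.slice gene (some i) (some (i + (m : Int))) = (gene.drop i.toNat).take m := by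
  rw [PySem.List.slice_toNat gene h0 (by omega)]
  congr 1
  omega

-- B's initial window fold computes the reduced window polynomial
lemma pv_window_init (gene : List String) (frm : Int) (m : Nat) (h0 : 0 ≤ frm)
    (h1 : frm + (m : Int) ≤ (gene.length : Int)) :
    (PySem.List.pyRange frm (frm + (m : Int)) 1).foldl
        (fun w j => (w * pvBase + pvEH (PySem.List.pyGetD gene j "")) % pvMod) 0
      = pvPoly ((gene.drop frm.toNat).take m) % pvMod := by
  induction m with
  | zero =>
    simp [PySem.List.pyRange_one_eq_nil, pvPoly, pvMod]
  | succ k ih =>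
    have hsp : frm + ((k + 1 : Nat) : Int) = (frm + (k : Int)) + 1 := by push_cast; ring
    rw [hsp, PySem.List.pyRange_one_succ_right (by omega), List.foldl_append,
        ih (by push_cast at h1; omega)]
    simp only [List.foldl_cons, List.foldl_nil]
    have hidx : frm.toNat + k < gene.length := by omega
    have hg : PySem.List.pyGetD gene (frm + (k : Int)) "" = gene[frm.toNat + k] := by
      rw [PySem.List.pyGetD_eq_getElem gene "" (by omega) (by omega)]
      congr 1
      omega
    have htake : (gene.drop frm.toNat).take (k + 1)
        = (gene.drop frm.toNat).take k ++ [gene[frm.toNat + k]] := by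
      rw [List.take_add_one]
      congr 1
      rw [List.getElem?_drop, List.getElem?_eq_getElem hidx]
      rfl
    rw [htake, pvPoly_append_singleton, hg]
    exact Int.ModEq.add_right _ (Int.ModEq.mul_right pvBase (Int.emod_emod_of_dvd _ dvd_rfl))

-- B's rolling loop finds the first verified match: it equals first-match-by-find?
lemma pvRkLoop_eq (gene pat : List String) (fuel : Nat) (i window : Int)
    (hm : 1 ≤ pat.length) (hi0 : 0 ≤ i) (hi : i ≤ (gene.length : Int) - (pat.length : Int))
    (hf : ((gene.length : Int) - (pat.length : Int) - i).toNat + 1 ≤ fuel)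
    (hw : window = pvPoly ((gene.drop i.toNat).take pat.length) % pvMod) :
    pvRkLoop gene pat (pvPoly pat % pvMod) (pvBase ^ (pat.length - 1) % pvMod) fuel i window
      = match (PySem.List.pyRange i ((gene.length : Int) - (pat.length : Int) + 1) 1).find?
            (fun k => decide (pat = PySem.List.slice gene (some k) (some (k + (pat.length : Int))))) with
        | some k => k
        | none => -1 := by
  induction fuel generalizing i window with
  | zero => omega
  | succ f ih =>
    have hcons := PySem.List.pyRange_one_cons (a := i) (b := (gene.length : Int) - (pat.length : Int) + 1) (by omega)
    rw [hcons]
    by_cases hmatch : pat = PySem.List.slice gene (some i) (some (i + (pat.length : Int)))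
    · rw [List.find?_cons_of_pos (by simp only [decide_eq_true_eq]; exact hmatch)]
      unfold pvRkLoop
      have hm2 := hmatch
      rw [pv_slice_eq gene i pat.length hi0] at hm2
      rw [if_pos ⟨by rw [hw]; exact congrArg (· % pvMod) (congrArg pvPoly hm2).symm, hmatch⟩]
    · rw [List.find?_cons_of_neg (by simp only [decide_eq_true_eq]; exact hmatch)]
      unfold pvRkLoop
      rw [if_neg (by intro h; exact hmatch h.2)]
      by_cases hend : i = (gene.length : Int) - (pat.length : Int)
      · rw [if_pos hend, PySem.List.pyRange_one_eq_nil (by omega)]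
        rfl
      · rw [if_neg hend]
        have hlt : i < (gene.length : Int) - (pat.length : Int) := by omega
        have hroll := pvPoly_roll gene i.toNat pat.length hm (by omega)
        have hga : PySem.List.pyGetD gene i "" = gene[i.toNat]'(by omega) := by
          rw [PySem.List.pyGetD_eq_getElem gene "" hi0 (by omega)]
        have hgb : PySem.List.pyGetD gene (i + (pat.length : Int)) "" = gene[i.toNat + pat.length]'(by omega) := by
          rw [PySem.List.pyGetD_eq_getElem gene "" (by omega) (by omega)]
          congr 1
          omega
        rw [ih (i + 1) _ (by omega) (by omega) (by omega)
          (by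
            have hidx : ((i : Int) + 1).toNat = i.toNat + 1 := by omega
            rw [pv_mod_eq, hga, hgb, hw, hidx, hroll]
            exact Int.ModEq.add_right _ (Int.ModEq.mul_right pvBase
              (Int.ModEq.sub (Int.emod_emod_of_dvd _ dvd_rfl)
                ((Int.ModEq.refl (pvEH (gene[i.toNat]'(by omega)))).mul
                  (Int.emod_emod_of_dvd _ dvd_rfl)))))]

-- rk_find equals first-match-by-find? over A's scan range
lemma pvRkFind_eq (gene pat : List String) (frm : Int) (hfrm : 0 ≤ frm) :
    pvRkFind gene pat frm
      = match (PySem.List.pyRange frm ((gene.length : Int) - (pat.length : Int) + 1) 1).find?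
            (fun i => decide (pat = PySem.List.slice gene (some i) (some (i + (pat.length : Int))))) with
        | some i => i
        | none => -1 := by
  unfold pvRkFind
  by_cases hm : (pat.length : Int) = 0
  · rw [if_pos hm]
    have hp0 : pat = [] := by
      cases pat with
      | nil => rfl
      | cons a t => simp at hm; omega
    by_cases hle : frm ≤ (gene.length : Int)
    · rw [if_pos hle, hm]
      rw [PySem.List.pyRange_one_cons (by omega)]
      rw [List.find?_cons_of_pos (by
        simp only [decide_eq_true_eq, hp0, add_zero]
        rw [PySem.List.slice_toNat gene hfrm hfrm]
        simp)]
    · rw [if_neg hle, hm, PySem.List.pyRange_one_eq_nil (by omega)]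
      rfl
  · rw [if_neg hm]
    have hm1 : 1 ≤ pat.length := by
      cases pat with
      | nil => simp at hm
      | cons a t => simp
    by_cases hout : frm > (gene.length : Int) - (pat.length : Int)
    · rw [if_pos hout, PySem.List.pyRange_one_eq_nil (by omega)]
      rfl
    · rw [if_neg hout]
      simp only [pv_mod_eq]
      have hinit := pv_window_init gene frm pat.length hfrm (by omega)
      have htgt : pat.foldl (fun t x => (t * pvBase + pvEH x) % pvMod) 0 = pvPoly pat % pvMod :=
        pvPolyM_eq pat
      have htop : (((pat.length : Int)) - 1).toNat = pat.length - 1 := by omega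
      rw [htgt, htop, hinit,
        pvRkLoop_eq gene pat _ frm _ hm1 hfrm (by omega) (by omega) rfl]

-- ===== A-side characterizations =====

-- A's inner loop computes: first slice match in [idx, L), turned into its end index, else the carried value
lemma pvAEndLoop_eq (gene ea : List String) (fuel : Nat) (idx L e : Int)
    (hf : (L - idx).toNat ≤ fuel) :
    pvAEndLoop gene ea fuel idx L e =
      match (PySem.List.pyRange idx L 1).find?
          (fun i => decide (ea = PySem.List.slice gene (some i) (some (i + (ea.length : Int))))) with
      | some k => k + (ea.length : Int) - 1
      | none => e := by
  induction fuel generalizing idx L e with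
  | zero =>
    rw [PySem.List.pyRange_one_eq_nil (by omega)]
    rfl
  | succ f ih =>
    by_cases h : idx < L
    · rw [PySem.List.pyRange_one_cons h]
      by_cases hm : ea = PySem.List.slice gene (some idx) (some (idx + (ea.length : Int)))
      · rw [List.find?_cons_of_pos (p := fun i => decide (ea = PySem.List.slice gene (some i) (some (i + (ea.length : Int))))) (by simp only [decide_eq_true_eq]; exact hm)]
        unfold pvAEndLoop
        rw [if_pos h]
        simp only
        rw [if_pos hm, ih (idx + 1) idx _ (by omega),
            PySem.List.pyRange_one_eq_nil (by omega)]
        rfl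
      · rw [List.find?_cons_of_neg (p := fun i => decide (ea = PySem.List.slice gene (some i) (some (i + (ea.length : Int))))) (by simp only [decide_eq_true_eq]; exact hm)]
        unfold pvAEndLoop
        rw [if_pos h]
        simp only
        rw [if_neg hm]
        exact ih (idx + 1) L e (by omega)
    · rw [PySem.List.pyRange_one_eq_nil (by omega)]
      unfold pvAEndLoop
      rw [if_neg h]
      rfl

-- A's outer loop: first slice match in [idx, L) paired with the inner-loop result, else the carried pair
lemma pvAStartLoop_eq (gene sa ea : List String) (fuel : Nat) (idx L s e : Int)
    (hf : (L - idx).toNat ≤ fuel) :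
    pvAStartLoop gene sa ea fuel idx L s e =
      match (PySem.List.pyRange idx L 1).find?
          (fun i => decide (sa = PySem.List.slice gene (some i) (some (i + (sa.length : Int))))) with
      | some i => (i, pvAEndLoop gene ea
                        (((gene.length : Int) - ((ea.length : Int) - 1)) - (i + (sa.length : Int))).toNat
                        (i + (sa.length : Int))
                        ((gene.length : Int) - ((ea.length : Int) - 1)) e)
      | none => (s, e) := by
  induction fuel generalizing idx L s e with
  | zero =>
    rw [PySem.List.pyRange_one_eq_nil (by omega)]
    rfl
  | succ f ih =>
    by_cases h : idx < L
    · rw [PySem.List.pyRange_one_cons h]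
      by_cases hm : sa = PySem.List.slice gene (some idx) (some (idx + (sa.length : Int)))
      · rw [List.find?_cons_of_pos (p := fun i => decide (sa = PySem.List.slice gene (some i) (some (i + (sa.length : Int))))) (by simp only [decide_eq_true_eq]; exact hm)]
        unfold pvAStartLoop
        rw [if_pos h]
        simp only
        rw [if_pos hm, ih (idx + 1) idx _ _ (by omega),
            PySem.List.pyRange_one_eq_nil (by omega)]
        rfl
      · rw [List.find?_cons_of_neg (p := fun i => decide (sa = PySem.List.slice gene (some i) (some (i + (sa.length : Int))))) (by simp only [decide_eq_true_eq]; exact hm)]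
        unfold pvAStartLoop
        rw [if_pos h]
        simp only
        rw [if_neg hm]
        exact ih (idx + 1) L s e (by omega)
    · rw [PySem.List.pyRange_one_eq_nil (by omega)]
      unfold pvAStartLoop
      rw [if_neg h]
      rfl

-- a find? result over pyRange frm L 1 is ≥ frm
lemma pv_find?_mem_lb (frm L : Int) (p : Int → Bool) (i : Int)
    (h : (PySem.List.pyRange frm L 1).find? p = some i) : frm ≤ i := by
  have := List.mem_of_find?_eq_some h
  rw [PySem.List.mem_pyRange_one] at this
  omega

-- ===== VERDICT (by name: the statement is the Claim_ definition above) =====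
theorem find_anchors_spec : Claim_equal_find_anchors := by
  intro gene start end_ reverse _
  unfold Spec_find_anchors find_anchors find_anchors_alt
  simp only
  set sa := (if reverse then ((pvStrList end_).reverse, (pvStrList start).reverse)
             else (pvStrList start, pvStrList end_)).1 with hsa
  set ea := (if reverse then ((pvStrList end_).reverse, (pvStrList start).reverse)
             else (pvStrList start, pvStrList end_)).2 with hea
  have hL : (gene.length : Int) - ((sa.length : Int) - 1)
          = (gene.length : Int) - (sa.length : Int) + 1 := by ring
  rw [pvAStartLoop_eq gene sa ea _ _ _ _ _ le_rfl, hL, pvRkFind_eq gene sa 0 le_rfl]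
  cases hfs : (PySem.List.pyRange 0 ((gene.length : Int) - (sa.length : Int) + 1) 1).find?
      (fun i => decide (sa = PySem.List.slice gene (some i) (some (i + (sa.length : Int))))) with
  | none => simp
  | some i =>
    have hi0 : (0 : Int) ≤ i := pv_find?_mem_lb _ _ _ _ hfs
    simp only
    rw [if_neg (by simp only [beq_iff_eq]; omega)]
    have hfrm : (0 : Int) ≤ i + (sa.length : Int) := by positivity
    rw [pvRkFind_eq gene ea _ hfrm,
        pvAEndLoop_eq gene ea _ (i + (sa.length : Int)) _ (-1) le_rfl]
    have hLe : (gene.length : Int) - ((ea.length : Int) - 1)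
             = (gene.length : Int) - (ea.length : Int) + 1 := by ring
    rw [hLe]
    cases hfe : (PySem.List.pyRange (i + (sa.length : Int))
        ((gene.length : Int) - (ea.length : Int) + 1) 1).find?
        (fun k => decide (ea = PySem.List.slice gene (some k) (some (k + (ea.length : Int))))) with
    | none => simp
    | some k =>
      have hk0 : i + (sa.length : Int) ≤ k := pv_find?_mem_lb _ _ _ _ hfe
      simp only
      rw [if_neg (by simp only [beq_iff_eq]; omega)]
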